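-- pv_equiv track=rewrite | github.com/gksruf2848/Algorithm_Python | Programmers_Algorithm/lv.1/86491.py | solution
-- ===== SOURCE A (Python) =====
-- def solution(sizes):
--     w, h = 0, 0
--     for i in range(len(sizes)):
--         sizes[i].sort()
--         if w < sizes[i][0]:
--             w = sizes[i][0]
--         if h < sizes[i][1]:
--             h = sizes[i][1]
--     return w*h
-- ===== SOURCE B (Python) =====
-- def _two_smallest(s):
--     # two smallest elements (with multiplicity) by a linear selection scan; no sorting
--     m1, m2 = s[0], s[1]
--     if m2 < m1:
--         m1, m2 = m2, m1
--     for x in s[2:]: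
--         if x < m1:
--             m1, m2 = x, m1
--         elif x < m2:
--             m2 = x
--     return m1, m2
--
--
-- def solution(sizes):
--     pairs = [_two_smallest(s) for s in sizes]
--     w = max([0] + [a for a, _ in pairs])
--     h = max([0] + [b for _, b in pairs])
--     return w * h
-- ===== Notes on version B (the rewrite author's own statement) =====
-- stated objective: alternative
-- what changed: Replaces per-row in-place sorting plus one interleaved running-max loop by a sort-free selection scan that extracts each row's two smallest elements in a single linear pass, followed by two 0-seeded max reductions over those pairs; B does not mutate sizes (return value only).
import Mathlib
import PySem

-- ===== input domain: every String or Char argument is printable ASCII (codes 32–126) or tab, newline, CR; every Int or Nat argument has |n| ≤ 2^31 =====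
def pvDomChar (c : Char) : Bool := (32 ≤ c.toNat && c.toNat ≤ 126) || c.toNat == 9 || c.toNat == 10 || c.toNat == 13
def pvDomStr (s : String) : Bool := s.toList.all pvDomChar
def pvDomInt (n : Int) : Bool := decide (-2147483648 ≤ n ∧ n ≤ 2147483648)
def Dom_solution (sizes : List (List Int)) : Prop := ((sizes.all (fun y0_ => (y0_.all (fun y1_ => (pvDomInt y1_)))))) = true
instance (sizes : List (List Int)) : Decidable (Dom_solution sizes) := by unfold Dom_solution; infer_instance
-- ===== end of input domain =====

-- B extracts each row's two smallest elements by a linear selection scan (no sorting) and then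
-- takes two 0-seeded max reductions; A sorts each row in place, B does not mutate: the
-- equivalence proved here is about the RETURN value only.

-- ===== PORT A =====
def solution (sizes : List (List Int)) : Int :=
  let r := sizes.foldl (fun (wh : Int × Int) s =>
    let t := PySem.List.sorted s (fun y => y) false
    let w := if wh.1 < PySem.List.pyGetD t 0 0 then PySem.List.pyGetD t 0 0 else wh.1
    let h := if wh.2 < PySem.List.pyGetD t 1 0 then PySem.List.pyGetD t 1 0 else wh.2
    (w, h)) (0, 0)
  r.1 * r.2

-- ===== PORT B =====
-- linear selection scan for the two smallest elements (with multiplicity) of s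
def twoSmallest (s : List Int) : Int × Int :=
  match s with
  | a :: b :: rest =>
      let init := if b < a then (b, a) else (a, b)
      rest.foldl (fun (p : Int × Int) x =>
        if x < p.1 then (x, p.1) else if x < p.2 then (p.1, x) else p) init
  | _ => (0, 0)   -- Python raises IndexError on rows shorter than 2; excluded by Pre_solution

def solution_alt (sizes : List (List Int)) : Int :=
  let pairs := sizes.map twoSmallest
  let w := (PySem.List.max? (0 :: pairs.map Prod.fst) (fun y => y)).getD 0
  let h := (PySem.List.max? (0 :: pairs.map Prod.snd) (fun y => y)).getD 0
  w * h

-- ===== PRECONDITION & SPEC =====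
-- Pre_: every inner list has at least two elements; on shorter ones both A and B raise IndexError.
def Pre_solution (sizes : List (List Int)) : Prop := ∀ s ∈ sizes, 2 ≤ s.length
instance (sizes : List (List Int)) : Decidable (Pre_solution sizes) := by unfold Pre_solution; infer_instance
def pvWitness_solution : List (List Int) := [[60, 50], [30, 70], [60, 30], [80, 40]]
def Spec_solution (sizes : List (List Int)) (out : Int) : Prop := out = solution_alt sizes
instance (sizes : List (List Int)) (out : Int) : Decidable (Spec_solution sizes out) := by unfold Spec_solution; infer_instance

-- ===== CLAIM (what is proved, stated in full; the proofs are below) =====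
def Claim_equal_solution : Prop := ∀ (sizes : List (List Int)), Dom_solution sizes → Pre_solution sizes → Spec_solution sizes (solution sizes)

-- ===== LEMMAS AND PROOFS =====
def iSort (l : List Int) : List Int := List.insertionSort (· ≤ ·) l

def first2 : List Int → Int × Int
  | a :: b :: _ => (a, b)
  | _ => (0, 0)

def selStep (p : Int × Int) (x : Int) : Int × Int :=
  if x < p.1 then (x, p.1) else if x < p.2 then (p.1, x) else p

lemma iSort_pairwise (l : List Int) : (iSort l).Pairwise (· ≤ ·) :=
  List.pairwise_insertionSort _ l

lemma iSort_perm (l : List Int) : (iSort l).Perm l :=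
  List.perm_insertionSort _ l

lemma iSort_perm_eq {l l' : List Int} (h : l.Perm l') : iSort l = iSort l' :=
  List.Perm.eq_of_pairwise (fun a b _ _ hab hba => le_antisymm hab hba)
    (iSort_pairwise l) (iSort_pairwise l')
    ((iSort_perm l).trans (h.trans (iSort_perm l').symm))

lemma sortedPy_eq_iSort (s : List Int) :
    PySem.List.sorted s (fun y => y) false = iSort s :=
  PySem.List.sorted_id_eq_of_perm_of_pairwise s (iSort s) (iSort_perm s) (iSort_pairwise s)

-- rotate the third element to the front: (u::v::w::t) ~ (w::u::v::t)
lemma perm_rot3 (u v w : Int) (t : List Int) : (u :: v :: w :: t).Perm (w :: u :: v :: t) :=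
  ((List.Perm.swap w v t).cons u).trans (List.Perm.swap w u (v :: t))

-- dropping an element e that is ≥ the two front elements does not change the two smallest
lemma take2K (c d e : Int) (t : List Int) (h1 : c ≤ d) (h2 : d ≤ e) :
    first2 (iSort (c :: d :: e :: t)) = first2 (iSort (c :: d :: t)) := by
  have heq : iSort (c :: d :: e :: t) = List.orderedInsert (· ≤ ·) e (iSort (c :: d :: t)) := by
    rw [iSort_perm_eq (perm_rot3 c d e t)]; rfl
  have hperm := iSort_perm (c :: d :: t)
  have hlen : (iSort (c :: d :: t)).length = t.length + 2 := by
    simpa using hperm.length_eq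
  obtain ⟨l0, l1, r, hl⟩ : ∃ l0 l1 r, iSort (c :: d :: t) = l0 :: l1 :: r := by
    match hm : iSort (c :: d :: t) with
    | [] => rw [hm] at hlen; simp at hlen
    | [x] => rw [hm] at hlen; simp at hlen
    | x :: y :: r => exact ⟨x, y, r, rfl⟩
  have hs := iSort_pairwise (c :: d :: t)
  rw [hl] at hs hperm heq
  have h01 : l0 ≤ l1 := List.rel_of_pairwise_cons hs (by simp)
  have hl1d : l1 ≤ d := by
    by_contra hcon
    push_neg at hcon
    have hcnt : (l0 :: l1 :: r).countP (fun x => decide (x ≤ d)) =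
        (c :: d :: t).countP (fun x => decide (x ≤ d)) := hperm.countP_eq _
    have hz : (l1 :: r).countP (fun x => decide (x ≤ d)) = 0 := by
      rw [List.countP_eq_zero]
      intro x hx
      have hle : l1 ≤ x := by
        rcases List.mem_cons.mp hx with h | h
        · exact h ▸ le_refl _
        · exact List.rel_of_pairwise_cons (List.pairwise_cons.mp hs).2 h
      simp only [decide_eq_true_eq]
      omega
    have hR : 2 ≤ (c :: d :: t).countP (fun x => decide (x ≤ d)) := by
      rw [List.countP_cons, List.countP_cons]
      simp [h1]
    rw [← hcnt, List.countP_cons, hz] at hR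
    split at hR <;> omega
  rw [heq, hl]
  simp only [List.orderedInsert]
  split_ifs with ha hb
  · -- e ≤ l0 : then e = l0 = l1
    have he0 : e = l0 := by omega
    have he1 : l0 = l1 := by omega
    simp [first2, he0, he1]
  · -- l0 < e ≤ l1 : then e = l1
    have : e = l1 := by omega
    simp [first2, this]
  · simp [first2]

lemma fold_invariant (t : List Int) (a b : Int) (hab : a ≤ b) :
    t.foldl selStep (a, b) = first2 (iSort (a :: b :: t)) := by
  induction t generalizing a b with
  | nil =>
      simp [iSort, List.insertionSort, List.orderedInsert, hab, first2]
  | cons x t ih =>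
      simp only [List.foldl_cons]
      by_cases h1 : x < a
      · have hstep : selStep (a, b) x = (x, a) := by simp [selStep, h1]
        rw [hstep, ih x a (by omega)]
        rw [show iSort (a :: b :: x :: t) = iSort (x :: a :: b :: t) from
          iSort_perm_eq (perm_rot3 a b x t)]
        exact (take2K x a b t (by omega) hab).symm
      · by_cases h2 : x < b
        · have hstep : selStep (a, b) x = (a, x) := by simp [selStep, h1, h2]
          rw [hstep, ih a x (by omega)]
          rw [show iSort (a :: b :: x :: t) = iSort (a :: x :: b :: t) from
            iSort_perm_eq ((List.Perm.swap x b t).cons a)]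
          exact (take2K a x b t (by omega) (by omega)).symm
        · have hstep : selStep (a, b) x = (a, b) := by simp [selStep, h1, h2]
          rw [hstep, ih a b hab]
          exact (take2K a b x t hab (by omega)).symm

lemma twoSmallest_eq (a b : Int) (rest : List Int) :
    twoSmallest (a :: b :: rest) = first2 (iSort (a :: b :: rest)) := by
  show rest.foldl selStep (if b < a then (b, a) else (a, b)) = _
  split_ifs with h
  · rw [fold_invariant rest b a (by omega),
      iSort_perm_eq (List.Perm.swap b a rest)]
  · exact fold_invariant rest a b (by omega)

lemma pyIdx_sorted (s : List Int) (h : 2 ≤ s.length) :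
    (PySem.List.pyGetD (PySem.List.sorted s (fun y => y) false) 0 0,
     PySem.List.pyGetD (PySem.List.sorted s (fun y => y) false) 1 0) = twoSmallest s := by
  match s, h with
  | a :: b :: rest, _ =>
    rw [sortedPy_eq_iSort, twoSmallest_eq]
    have hlen : (iSort (a :: b :: rest)).length = rest.length + 2 := by
      simpa using (iSort_perm (a :: b :: rest)).length_eq
    obtain ⟨l0, l1, r, hl⟩ : ∃ l0 l1 r, iSort (a :: b :: rest) = l0 :: l1 :: r := by
      match hm : iSort (a :: b :: rest) with
      | [] => rw [hm] at hlen; simp at hlen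
      | [x] => rw [hm] at hlen; simp at hlen
      | x :: y :: r => exact ⟨x, y, r, rfl⟩
    rw [hl]
    simp [PySem.List.pyGetD_zero_cons, PySem.List.pyGetD_ofNat', first2]

lemma ite_lt_eq_max (a b : Int) : (if a < b then b else a) = max a b := by
  split_ifs <;> omega

lemma solution_fold (sizes : List (List Int)) (w h : Int) :
    sizes.foldl (fun (wh : Int × Int) s =>
      let t := PySem.List.sorted s (fun y => y) false
      let w := if wh.1 < PySem.List.pyGetD t 0 0 then PySem.List.pyGetD t 0 0 else wh.1
      let h := if wh.2 < PySem.List.pyGetD t 1 0 then PySem.List.pyGetD t 1 0 else wh.2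
      (w, h)) (w, h) =
    ((sizes.map (fun s => PySem.List.pyGetD (PySem.List.sorted s (fun y => y) false) 0 0)).foldl max w,
     (sizes.map (fun s => PySem.List.pyGetD (PySem.List.sorted s (fun y => y) false) 1 0)).foldl max h) := by
  induction sizes generalizing w h with
  | nil => rfl
  | cons x xs ih =>
      simp only [List.foldl_cons, List.map_cons]
      rw [ite_lt_eq_max, ite_lt_eq_max, ih]

-- ===== VERDICT (by name: the statement is the Claim_ definition above) =====
theorem solution_spec : Claim_equal_solution := by
  intro sizes _ hpre
  unfold Spec_solution solution solution_alt
  rw [solution_fold]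
  simp only [PySem.List.max?_id_cons, Option.getD_some, List.map_map]
  have h0 : sizes.map (fun s => PySem.List.pyGetD (PySem.List.sorted s (fun y => y) false) 0 0) =
      sizes.map (Prod.fst ∘ twoSmallest) := by
    apply List.map_congr_left
    intro s hs
    have := pyIdx_sorted s (hpre s hs)
    simpa using congrArg Prod.fst this
  have h1 : sizes.map (fun s => PySem.List.pyGetD (PySem.List.sorted s (fun y => y) false) 1 0) =
      sizes.map (Prod.snd ∘ twoSmallest) := by
    apply List.map_congr_left
    intro s hs
    have := pyIdx_sorted s (hpre s hs)
    simpa using congrArg Prod.snd this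
  rw [h0, h1]
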